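-- pv_equiv track=rewrite | github.com/kawamataryo/leetcode | solutions/2363.merge-similar-items.py | mergeSimilarItems
-- ===== SOURCE A (Python) =====
-- from typing import List
--
-- def mergeSimilarItems(items1: List[List[int]], items2: List[List[int]]) -> List[List[int]]:
--     item_map = {}
--     for item in [*items1, *items2]:
--         if item[0] in item_map:
--             item_map[item[0]] = [item_map[item[0]][0], item_map[item[0]][1] + item[1]]
--         else:
--             item_map[item[0]] = item
--
--     return sorted(item_map.values(), key=lambda x: x[0])
-- ===== SOURCE B (Python) =====
-- def mergeSimilarItems(items1, items2):
--     merged = sorted(items1 + items2, key=lambda x: x[0])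
--     res = []
--     i = 0
--     n = len(merged)
--     while i < n:
--         x = merged[i]
--         j = i + 1
--         while j < n and merged[j][0] == x[0]:
--             j += 1
--         if j == i + 1:
--             res.append(x)
--         else:
--             res.append([x[0], sum(y[1] for y in merged[i:j])])
--         i = j
--     return res
-- ===== Notes on version B (the rewrite author's own statement) =====
-- stated objective: alternative
-- what changed: Replaces the dictionary aggregation followed by a sort of the dict values with a single sort of the concatenated list by value and one linear grouping scan that sums consecutive equal-value runs (no dictionary).
import Mathlib
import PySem

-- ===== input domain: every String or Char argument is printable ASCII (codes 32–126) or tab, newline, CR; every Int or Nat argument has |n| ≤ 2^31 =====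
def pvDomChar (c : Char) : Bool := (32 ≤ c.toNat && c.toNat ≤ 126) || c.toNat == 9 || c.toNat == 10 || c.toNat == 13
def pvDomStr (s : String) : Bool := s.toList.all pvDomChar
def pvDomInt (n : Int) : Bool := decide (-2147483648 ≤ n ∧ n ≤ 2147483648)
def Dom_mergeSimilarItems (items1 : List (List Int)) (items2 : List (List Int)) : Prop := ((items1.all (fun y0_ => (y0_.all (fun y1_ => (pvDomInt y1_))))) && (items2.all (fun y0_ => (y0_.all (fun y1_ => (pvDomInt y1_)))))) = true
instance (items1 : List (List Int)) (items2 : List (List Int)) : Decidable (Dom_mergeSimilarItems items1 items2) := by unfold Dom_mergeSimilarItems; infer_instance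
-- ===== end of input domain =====

-- B replaces A's dict aggregation + sort of the values by one sort of the combined list and a
-- linear grouping scan summing consecutive equal-value runs (alternative algorithm, no dict).

-- shared accessors: item[0] and item[1] (pyGetD: default never reached inside Pre_)
def pvKey (it : List Int) : Int := PySem.List.pyGetD it 0 0
def pvWt (it : List Int) : Int := PySem.List.pyGetD it 1 0

-- ===== PORT A =====
-- loop body of A's for-loop (item_map[item[0]] lookups are getD with dummy default [], guarded by contains)
def aStep (m : PySem.Dict Int (List Int)) (item : List Int) : PySem.Dict Int (List Int) :=
  if m.contains (pvKey item) then
    m.insert (pvKey item)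
      [PySem.List.pyGetD (m.getD (pvKey item) []) 0 0,
       PySem.List.pyGetD (m.getD (pvKey item) []) 1 0 + pvWt item]
  else
    m.insert (pvKey item) item

def mergeSimilarItems (items1 : List (List Int)) (items2 : List (List Int)) : List (List Int) :=
  let item_map := (items1 ++ items2).foldl aStep PySem.Dict.empty
  PySem.List.sorted item_map.values (fun x => PySem.List.pyGetD x 0 0) false

-- ===== PORT B =====
-- the grouping scan over the sorted list (B's while-loop: one group per iteration)
def groupSum : List (List Int) → List (List Int)
  | [] => []
  | x :: rest =>
    let same := rest.takeWhile (fun y => pvKey y == pvKey x)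
    let rest' := rest.dropWhile (fun y => pvKey y == pvKey x)
    (if same.isEmpty then x else [pvKey x, ((x :: same).map pvWt).sum]) :: groupSum rest'
termination_by s => s.length
decreasing_by
  simp only [List.length_cons]
  exact Nat.lt_succ_of_le (List.length_dropWhile_le _ _)

def mergeSimilarItems_alt (items1 : List (List Int)) (items2 : List (List Int)) : List (List Int) :=
  groupSum (PySem.List.sorted (items1 ++ items2) (fun x => PySem.List.pyGetD x 0 0) false)

-- ===== PRECONDITION & SPEC =====
-- Pre_ excludes exactly the inputs on which the Python A raises IndexError: an empty item
-- (item[0]), or a value occurring more than once with some occurrence of length < 2 (item[1]).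
def Pre_mergeSimilarItems (items1 : List (List Int)) (items2 : List (List Int)) : Prop :=
  ∀ it ∈ items1 ++ items2, it ≠ [] ∧
    (2 ≤ (items1 ++ items2).countP (fun j => j.headI == it.headI) → 2 ≤ it.length)
instance (items1 : List (List Int)) (items2 : List (List Int)) : Decidable (Pre_mergeSimilarItems items1 items2) := by
  unfold Pre_mergeSimilarItems; infer_instance

def pvWitness_mergeSimilarItems : List (List Int) × List (List Int) :=
  ([[1, 2], [3, 4]], [[1, 5], [2, 7]])

def Spec_mergeSimilarItems (items1 : List (List Int)) (items2 : List (List Int)) (out : List (List Int)) : Prop := out = mergeSimilarItems_alt items1 items2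
instance (items1 : List (List Int)) (items2 : List (List Int)) (out : List (List Int)) : Decidable (Spec_mergeSimilarItems items1 items2 out) := by unfold Spec_mergeSimilarItems; infer_instance

-- ===== CLAIM (what is proved, stated in full; the proofs are below) =====
def Claim_equal_mergeSimilarItems : Prop := ∀ (items1 : List (List Int)) (items2 : List (List Int)), Dom_mergeSimilarItems items1 items2 → Pre_mergeSimilarItems items1 items2 → Spec_mergeSimilarItems items1 items2 (mergeSimilarItems items1 items2)

-- ===== LEMMAS AND PROOFS =====

-- the value A's dict holds for a key whose matching items (in order) are g
def G (g : List (List Int)) : List Int :=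
  match g with
  | [] => []
  | f :: rest => if rest.isEmpty then f else [pvKey f, ((f :: rest).map pvWt).sum]

lemma aStep_eq : aStep = fun m item => m.insert (pvKey item)
    (if m.contains (pvKey item) then
      [PySem.List.pyGetD (m.getD (pvKey item) []) 0 0,
       PySem.List.pyGetD (m.getD (pvKey item) []) 1 0 + pvWt item] else item) := by
  funext m item
  by_cases h : m.contains (pvKey item) <;> simp [aStep, h]
lemma contains_fold (l : List (List Int)) (m : PySem.Dict Int (List Int)) (k : Int) :
    (l.foldl aStep m).contains k = (m.contains k || l.any (fun it => pvKey it == k)) := by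
  induction l generalizing m with
  | nil => simp
  | cons x t ih =>
    simp only [List.foldl_cons, List.any_cons, ih]
    have : (aStep m x).contains k = (k == pvKey x || m.contains k) := by
      by_cases h : m.contains (pvKey x) <;> simp [aStep, h, PySem.Dict.contains_insert]
    rw [this]
    cases h1 : m.contains k <;> cases h2 : (k == pvKey x) <;>
      simp_all [BEq.comm]
lemma keys_fold (l : List (List Int)) :
    (l.foldl aStep PySem.Dict.empty).keys = PySem.Set.ofList (l.map pvKey) := by
  rw [aStep_eq, PySem.Dict.keys_foldl_insert_key l pvKey]
  simp [PySem.Set.update_nil_left]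
lemma getD_fold (l : List (List Int)) (v : Int) :
    ((l.foldl aStep PySem.Dict.empty).getD v []) = G (l.filter (fun it => pvKey it == v)) := by
  induction l using List.reverseRecOn with
  | nil => simp [G, PySem.Dict.getD_empty]
  | append_singleton l x ih =>
    rw [List.foldl_append, List.foldl_cons, List.foldl_nil, List.filter_append]
    set m := l.foldl aStep PySem.Dict.empty with hm
    by_cases hv : v = pvKey x
    · subst hv
      have hc : m.contains (pvKey x) = l.any (fun it => pvKey it == pvKey x) := by
        rw [hm, contains_fold]; simp
      by_cases hany : l.any (fun it => pvKey it == pvKey x) = true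
      · -- previous occurrence exists
        have hne : l.filter (fun it => pvKey it == pvKey x) ≠ [] := by
          simp only [List.any_eq_true] at hany
          obtain ⟨it, hit, hke⟩ := hany
          intro h
          have hmem : it ∈ List.filter (fun it => pvKey it == pvKey x) l :=
            List.mem_filter.mpr ⟨hit, hke⟩
          rw [h] at hmem; exact absurd hmem (List.not_mem_nil)
        obtain ⟨f, rest, hfr⟩ := List.exists_cons_of_ne_nil hne
        rw [hfr] at ih ⊢
        simp only [aStep, hc, hany, if_pos, ih]

        rw [PySem.Dict.getD_insert]
        cases rest with
        | nil =>
          simp [G, pvKey, pvWt]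
        | cons r rs =>
          simp [G, PySem.List.pyGetD]
          ring
      · -- first occurrence
        have hf : l.filter (fun it => pvKey it == pvKey x) = [] := by
          rw [List.filter_eq_nil_iff]
          intro a ha
          simp only [List.any_eq_true, not_exists, not_and] at hany
          simp [hany a ha]
        rw [hf]
        simp only [aStep, hc, hany]
        simp only [Bool.false_eq_true, if_false]
        rw [PySem.Dict.getD_insert]
        simp [G]
    · -- different key
      have hx : (List.filter (fun it => pvKey it == v) [x]) = [] := by
        simp [Ne.symm hv]
      rw [hx, List.append_nil, ← ih]
      by_cases h : m.contains (pvKey x) <;>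
        simp [aStep, h, PySem.Dict.getD_insert, hv]
lemma ofList_sublist {α : Type} [BEq α] [LawfulBEq α] (xs : List α) : List.Sublist (PySem.Set.ofList xs : List α) xs := by
  induction xs using List.reverseRecOn with
  | nil => simp [PySem.Set.ofList_nil]
  | append_singleton l x ih =>
    rw [PySem.Set.ofList_append_singleton, PySem.Set.add_eq_ite]
    split
    · exact ih.trans (List.sublist_append_left _ _)
    · exact List.Sublist.append ih (List.Sublist.refl _)
lemma key_G (f : List Int) (rest : List (List Int)) : pvKey (G (f :: rest)) = pvKey f := by
  cases rest with
  | nil => simp [G]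
  | cons r rs => simp [G, pvKey, PySem.List.pyGetD]
lemma mergeA_eq (items1 items2 : List (List Int)) :
    mergeSimilarItems items1 items2 =
      (PySem.List.sorted (PySem.Set.ofList ((items1 ++ items2).map pvKey)) (fun x => x) false).map
        (fun v => G ((items1 ++ items2).filter (fun it => pvKey it == v))) := by
  set l := items1 ++ items2 with hl
  set m := l.foldl aStep PySem.Dict.empty with hm
  set F : Int → List Int := fun v => G (l.filter (fun it => pvKey it == v)) with hF
  set K : List Int := PySem.Set.ofList (l.map pvKey) with hK
  set ascKeys := PySem.List.sorted K (fun x => x) false with hasc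
  have hnd : m.keys.Nodup := by rw [hm, keys_fold]; exact PySem.Set.nodup_ofList _
  have hkeys : m.keys = K := by rw [hm, keys_fold]
  have hvals : m.values = K.map F := by
    rw [PySem.Dict.values_eq_map_keys m hnd [], hkeys]
    exact List.map_congr_left (fun k _ => by rw [hm, getD_fold])
  -- key of F v is v for keys actually present
  have hkeyF : ∀ v ∈ ascKeys, pvKey (F v) = v := by
    intro v hv
    have hv' : v ∈ K := (PySem.List.mem_sorted _ _ _ _).mp hv
    have hv2 : v ∈ l.map pvKey := (PySem.Set.mem_ofList _ _).mp hv'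
    obtain ⟨it, hit, hke⟩ := List.mem_map.mp hv2
    have hmem : it ∈ l.filter (fun it => pvKey it == v) :=
      List.mem_filter.mpr ⟨hit, by simp [hke]⟩
    rcases hcase : l.filter (fun it => pvKey it == v) with _ | ⟨f, rest⟩
    · rw [hcase] at hmem; exact absurd hmem (List.not_mem_nil)
    · have hf : f ∈ l.filter (fun it => pvKey it == v) := by rw [hcase]; exact List.mem_cons_self
      have : pvKey f = v := by
        have := List.of_mem_filter hf; simpa using this
      rw [hF]; simp only [hcase, key_G, this]
  have hpw : List.Pairwise (fun a b => (fun x => PySem.List.pyGetD x 0 0) a < (fun x => PySem.List.pyGetD x 0 0) b) (ascKeys.map F) := by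
    rw [List.pairwise_map]
    have hlt : List.Pairwise (fun a b => a < b) ascKeys := PySem.List.sorted_ofList_pairwise_lt _
    exact hlt.imp_of_mem (fun {a b} ha hb hab => by
      have h1 := hkeyF a ha; have h2 := hkeyF b hb
      simp only [pvKey] at h1 h2
      simp only [h1, h2]; exact hab)
  have hperm : (ascKeys.map F).Perm (m.values) := by
    rw [hvals]
    exact List.Perm.map F (PySem.List.sorted_perm _ _ _)
  show PySem.List.sorted m.values (fun x => PySem.List.pyGetD x 0 0) false = ascKeys.map F
  exact PySem.List.sorted_eq_of_perm_of_pairwise_lt _ _ _ hperm hpw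
lemma filter_insertBy (key : List Int → Int) (p : List Int → Bool) (x : List Int) (ys : List (List Int))
    (h : ys.Pairwise (fun a b => key a ≤ key b)) :
    (PySem.List.insertBy (fun a b => decide (key a < key b)) x ys).filter p
      = if p x then PySem.List.insertBy (fun a b => decide (key a < key b)) x (ys.filter p)
        else ys.filter p := by
  induction ys with
  | nil => by_cases hp : p x <;> simp [PySem.List.insertBy, hp]
  | cons y t ih =>
    have hpw := List.pairwise_cons.mp h
    rw [PySem.List.insertBy]
    by_cases hlt : key x < key y
    · -- x goes in front
      simp only [hlt, decide_true, if_pos]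
      have hfront : ∀ zs : List (List Int), (∀ z ∈ zs, key y ≤ key z) →
          PySem.List.insertBy (fun a b => decide (key a < key b)) x (zs.filter p) = x :: zs.filter p := by
        intro zs hz
        cases hzs : zs.filter p with
        | nil => simp [PySem.List.insertBy]
        | cons z zt =>
          have hzmem : z ∈ zs := List.mem_of_mem_filter (hzs ▸ List.mem_cons_self)
          rw [PySem.List.insertBy]
          have : key x < key z := lt_of_lt_of_le hlt (hz z hzmem)
          simp [this]
      have hyz : ∀ z ∈ y :: t, key y ≤ key z := by
        intro z hz; rcases List.mem_cons.mp hz with rfl | hz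
        · exact le_refl _
        · exact hpw.1 z hz
      by_cases hp : p x
      · simp only [hp, if_pos]
        rw [hfront (y :: t) hyz]
        simp [List.filter_cons, hp]
      · simp [hp, List.filter_cons]
    · -- x goes after y
      simp only [hlt, decide_false, Bool.false_eq_true, if_false]
      rw [List.filter_cons, List.filter_cons]
      by_cases hpy : p y
      · simp only [hpy, if_pos]
        rw [ih hpw.2]
        by_cases hp : p x
        · simp only [hp, if_pos]
          rw [PySem.List.insertBy]
          simp [hlt]
        · simp [hp]
      · simp only [hpy, Bool.false_eq_true, if_false]
        rw [ih hpw.2]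

lemma filter_sorted (key : List Int → Int) (p : List Int → Bool) (xs : List (List Int)) :
    (PySem.List.sorted xs key false).filter p = PySem.List.sorted (xs.filter p) key false := by
  rw [PySem.List.sorted_eq_foldl_insertBy, PySem.List.sorted_eq_foldl_insertBy]
  suffices h : ∀ (xs : List (List Int)) (acc : List (List Int)), acc.Pairwise (fun a b => key a ≤ key b) →
      (xs.foldl (fun acc x => PySem.List.insertBy (fun a b => decide (key a < key b)) x acc) acc).filter p
        = (xs.filter p).foldl (fun acc x => PySem.List.insertBy (fun a b => decide (key a < key b)) x acc) (acc.filter p) by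
    simpa using h xs []
  intro xs
  induction xs with
  | nil => simp
  | cons x t ih =>
    intro acc hacc
    rw [List.foldl_cons, List.filter_cons]
    have hacc' : (PySem.List.insertBy (fun a b => decide (key a < key b)) x acc).Pairwise (fun a b => key a ≤ key b) :=
      PySem.List.insertBy_pairwise_le key x acc hacc
    rw [ih _ hacc', filter_insertBy key p x acc hacc]
    by_cases hp : p x <;> simp [hp]

lemma filter_sorted_key (xs : List (List Int)) (v : Int) :
    (PySem.List.sorted xs pvKey false).filter (fun it => pvKey it == v)
      = xs.filter (fun it => pvKey it == v) := by
  rw [filter_sorted]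
  exact PySem.List.sorted_eq_self_of_pairwise _ _ (List.pairwise_of_forall_mem_list (by
    intro a ha b hb
    have ha' := List.of_mem_filter ha
    have hb' := List.of_mem_filter hb
    simp only [beq_iff_eq] at ha' hb'
    rw [ha', hb']))
lemma add_cons (v z : Int) (s : List Int) (h : z ≠ v) :
    PySem.Set.add (v :: s) z = v :: PySem.Set.add s z := by
  rw [PySem.Set.add_eq_ite, PySem.Set.add_eq_ite]
  simp only [List.mem_cons, h, false_or]
  split_ifs <;> simp

lemma foldl_add_cons (v : Int) (zs : List Int) (s : List Int) (h : v ∉ zs) :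
    List.foldl PySem.Set.add (v :: s) zs = v :: List.foldl PySem.Set.add s zs := by
  induction zs generalizing s with
  | nil => rfl
  | cons z zt ih =>
    have hzv : z ≠ v := fun he => h (he ▸ List.mem_cons_self)
    rw [List.foldl_cons, List.foldl_cons, add_cons v z s hzv]
    exact ih _ (fun hm => h (List.mem_cons_of_mem _ hm))

lemma ofList_run (v : Int) (ys zs : List Int) (h1 : ∀ u ∈ ys, u = v) (h2 : v ∉ zs) :
    PySem.Set.ofList (v :: ys ++ zs) = v :: PySem.Set.ofList zs := by
  have hskip : ∀ (ys' : List Int), (∀ u ∈ ys', u = v) → ∀ (s : PySem.Set Int), v ∈ s →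
      List.foldl PySem.Set.add s (ys' ++ zs) = List.foldl PySem.Set.add s zs := by
    intro ys' hys
    induction ys' with
    | nil => intro s _; rfl
    | cons u ut ih =>
      intro s hs
      have hu : u = v := hys u List.mem_cons_self
      rw [List.cons_append, List.foldl_cons, hu, PySem.Set.add_of_mem hs]
      exact ih (fun w hw => hys w (List.mem_cons_of_mem _ hw)) s hs
  rw [PySem.Set.ofList_eq_foldl, PySem.Set.ofList_eq_foldl, List.cons_append, List.foldl_cons]
  have hadd : PySem.Set.add ([] : PySem.Set Int) v = [v] := rfl
  rw [hadd, hskip ys h1 [v] List.mem_cons_self]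
  exact foldl_add_cons v zs [] h2
lemma dropWhile_gt (v : Int) (rest : List (List Int))
    (hp : rest.Pairwise (fun a b => pvKey a ≤ pvKey b)) (hb : ∀ y ∈ rest, v ≤ pvKey y) :
    ∀ y ∈ rest.dropWhile (fun y => pvKey y == v), v < pvKey y := by
  induction rest with
  | nil => simp
  | cons z t ih =>
    have hpw := List.pairwise_cons.mp hp
    by_cases hz : pvKey z == v
    · rw [List.dropWhile_cons, if_pos hz]
      exact ih hpw.2 (fun y hy => hb y (List.mem_cons_of_mem _ hy))
    · rw [List.dropWhile_cons, if_neg hz]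
      intro y hy
      have hzv : v < pvKey z := lt_of_le_of_ne (hb z List.mem_cons_self) (by simp only [beq_iff_eq] at hz; exact fun he => hz he.symm)
      rcases List.mem_cons.mp hy with rfl | hy
      · exact hzv
      · exact lt_of_lt_of_le hzv (hpw.1 y hy)
lemma groupSum_eq (s : List (List Int)) (h : s.Pairwise (fun a b => pvKey a ≤ pvKey b)) :
    groupSum s = (PySem.Set.ofList (s.map pvKey)).map
      (fun v => G (s.filter (fun it => pvKey it == v))) := by
  -- strong induction on length
  induction hn : s.length using Nat.strong_induction_on generalizing s with
  | _ n ihn =>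
  cases s with
  | nil => simp [groupSum, PySem.Set.ofList_nil]
  | cons x rest =>
    set same := rest.takeWhile (fun y => pvKey y == pvKey x) with hsame_def
    set rest' := rest.dropWhile (fun y => pvKey y == pvKey x) with hrest_def
    have hgseq : groupSum (x :: rest)
        = (if same.isEmpty then x else [pvKey x, ((x :: same).map pvWt).sum]) :: groupSum rest' := by
      rw [groupSum]
    have ih : rest'.Pairwise (fun a b => pvKey a ≤ pvKey b) →
        groupSum rest' = (PySem.Set.ofList (rest'.map pvKey)).map
          (fun v => G (rest'.filter (fun it => pvKey it == v))) := by
      intro hp'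
      apply ihn rest'.length _ rest' hp' rfl
      subst hn
      simp only [List.length_cons]
      exact Nat.lt_succ_of_le (List.length_dropWhile_le _ _)
    have hpw := List.pairwise_cons.mp h
    have hrest' : rest'.Pairwise (fun a b => pvKey a ≤ pvKey b) :=
      hpw.2.sublist (List.dropWhile_sublist _)
    have hgt : ∀ y ∈ rest', pvKey x < pvKey y := by
      rw [hrest_def]; exact dropWhile_gt (pvKey x) rest hpw.2 hpw.1
    have hsame : ∀ y ∈ same, pvKey y = pvKey x := by
      intro y hy; simpa using List.mem_takeWhile_imp hy
    have hsplit : rest = same ++ rest' := (List.takeWhile_append_dropWhile).symm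
    have hmap : (x :: rest).map pvKey = pvKey x :: same.map pvKey ++ rest'.map pvKey := by
      rw [hsplit]; simp
    have hnotin : pvKey x ∉ rest'.map pvKey := by
      intro hm
      obtain ⟨y, hy, hky⟩ := List.mem_map.mp hm
      exact absurd hky (ne_of_gt (hgt y hy))
    have hofl : PySem.Set.ofList ((x :: rest).map pvKey) = pvKey x :: PySem.Set.ofList (rest'.map pvKey) := by
      rw [hmap]
      exact ofList_run _ _ _ (by intro u hu; obtain ⟨y, hy, rfl⟩ := List.mem_map.mp hu; exact hsame y hy) hnotin
    have hfilterx : (x :: rest).filter (fun it => pvKey it == pvKey x) = x :: same := by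
      rw [List.filter_cons, if_pos (by simp), hsplit, List.filter_append]
      rw [List.filter_eq_self.mpr (fun a ha => by simp [hsame a ha])]
      rw [List.filter_eq_nil_iff.mpr (fun a ha => by simp [ne_of_gt (hgt a ha)]), List.append_nil]
    have hfilterw : ∀ w ∈ PySem.Set.ofList (rest'.map pvKey),
        (x :: rest).filter (fun it => pvKey it == w) = rest'.filter (fun it => pvKey it == w) := by
      intro w hw
      have hwx : w ≠ pvKey x := by
        intro he; exact hnotin (he ▸ (PySem.Set.mem_ofList _ _).mp hw)
      have hxw : ¬(pvKey x == w) = true := by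
        simp only [beq_iff_eq]
        exact fun he => hwx he.symm
      rw [List.filter_cons, if_neg hxw, hsplit, List.filter_append]
      rw [List.filter_eq_nil_iff.mpr (fun a ha => by
        simp only [beq_iff_eq, hsame a ha]
        exact fun he => hwx he.symm), List.nil_append]
    clear_value same rest'
    have hhead : (if same.isEmpty then x else [pvKey x, (pvWt x :: List.map pvWt same).sum]) = G (x :: same) := by
      cases same <;> simp [G]
    rw [hgseq, hofl]
    simp only [List.map_cons]
    rw [hfilterx, hhead, ih hrest',
      List.map_congr_left (fun w hw => congrArg G (hfilterw w hw))]
lemma mergeB_eq (items1 items2 : List (List Int)) :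
    mergeSimilarItems_alt items1 items2 =
      (PySem.List.sorted (PySem.Set.ofList ((items1 ++ items2).map pvKey)) (fun x => x) false).map
        (fun v => G ((items1 ++ items2).filter (fun it => pvKey it == v))) := by
  set l := items1 ++ items2 with hl
  set s := PySem.List.sorted l pvKey false with hs
  have halt : mergeSimilarItems_alt items1 items2 = groupSum s := rfl
  have hpw : s.Pairwise (fun a b => pvKey a ≤ pvKey b) := PySem.List.sorted_pairwise l pvKey
  rw [halt, groupSum_eq s hpw]
  have hkeys : (PySem.Set.ofList (s.map pvKey) : List Int)
      = PySem.List.sorted (PySem.Set.ofList (l.map pvKey)) (fun x => x) false := by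
    refine (PySem.List.sorted_eq_of_perm_of_pairwise_lt _ _ _ ?_ ?_).symm
    · rw [List.perm_ext_iff_of_nodup (PySem.Set.nodup_ofList _) (PySem.Set.nodup_ofList _)]
      intro a
      rw [PySem.Set.mem_ofList, PySem.Set.mem_ofList]
      have : (s.map pvKey).Perm (l.map pvKey) := (PySem.List.sorted_perm l pvKey false).map pvKey
      exact ⟨fun h => this.mem_iff.mp h, fun h => this.mem_iff.mpr h⟩
    · have hle : (PySem.Set.ofList (s.map pvKey) : List Int).Pairwise (fun a b => a ≤ b) :=
        (PySem.List.sorted_map_key_pairwise l pvKey).sublist (ofList_sublist _)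
      have hne : (PySem.Set.ofList (s.map pvKey) : List Int).Pairwise (fun a b => a ≠ b) :=
        PySem.Set.nodup_ofList _
      exact (hle.and hne).imp (fun hab => lt_of_le_of_ne hab.1 hab.2)
  rw [hkeys]
  exact List.map_congr_left (fun v _ => congrArg G (filter_sorted_key l v))

-- ===== VERDICT (by name: the statement is the Claim_ definition above) =====
theorem mergeSimilarItems_spec : Claim_equal_mergeSimilarItems := by
  intro items1 items2 _ _
  unfold Spec_mergeSimilarItems
  rw [mergeA_eq, mergeB_eq]
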